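-- pv_equiv track=rewrite | github.com/MrBrantCode/unitest_baseline | mut_generate/mist_train_taco/taco_13252/solution.py | calculate_min_jumps_difference
-- ===== SOURCE A (Python) =====
-- import math
--
-- def calculate_min_jumps_difference(X, Y):
--     def min_jumps(distance):
--         jumps = 0
--         while distance >= 0:
--             if distance == 0:
--                 jumps += 1
--                 break
--             d = int(math.log2(distance + 1))
--             if d == 0:
--                 jumps += 1
--                 break
--             y = 2 ** d - 1
--             distance -= y + 1
--             if distance == -1:
--                 jumps += 1
--                 break
--             jumps += 1
--         return jumps
--
--     jumps_player1 = min_jumps(X)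
--     jumps_player2 = min_jumps(Y)
--
--     if jumps_player1 == jumps_player2:
--         return (0, 0)
--     elif jumps_player1 < jumps_player2:
--         return (1, jumps_player2 - jumps_player1)
--     else:
--         return (2, jumps_player1 - jumps_player2)
-- ===== SOURCE B (Python) =====
-- def calculate_min_jumps_difference(X, Y):
--     # Closed form: the greedy power-of-two jumping uses exactly popcount(distance+1)
--     # jumps for distance >= 0, and 0 jumps for negative distance.
--     def min_jumps(distance):
--         if distance < 0:
--             return 0
--         return bin(distance + 1).count('1')
--
--     jumps_player1 = min_jumps(X)
--     jumps_player2 = min_jumps(Y)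
--
--     if jumps_player1 == jumps_player2:
--         return (0, 0)
--     elif jumps_player1 < jumps_player2:
--         return (1, jumps_player2 - jumps_player1)
--     else:
--         return (2, jumps_player1 - jumps_player2)
-- ===== Notes on version B (the rewrite author's own statement) =====
-- stated objective: simpler
-- what changed: Replaces A's iterative greedy loop (repeatedly subtracting the largest 2^d-1 block via math.log2) by the closed form popcount(distance+1) for min_jumps; the outer comparison is unchanged.
import Mathlib
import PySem

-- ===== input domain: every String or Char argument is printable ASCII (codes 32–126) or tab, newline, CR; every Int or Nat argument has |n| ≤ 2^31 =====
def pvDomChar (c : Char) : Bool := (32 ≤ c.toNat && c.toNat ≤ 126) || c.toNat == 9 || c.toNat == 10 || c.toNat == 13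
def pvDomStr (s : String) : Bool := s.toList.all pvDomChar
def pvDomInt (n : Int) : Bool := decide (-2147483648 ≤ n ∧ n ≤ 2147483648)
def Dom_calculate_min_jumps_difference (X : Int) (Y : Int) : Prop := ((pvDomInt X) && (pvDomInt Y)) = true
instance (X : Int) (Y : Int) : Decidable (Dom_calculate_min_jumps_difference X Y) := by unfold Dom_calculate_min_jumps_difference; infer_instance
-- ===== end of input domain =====

-- B replaces A's greedy subtract-largest-2^d-1 loop by the closed form popcount(distance+1); same outer comparison (objective: simpler).

-- ===== PORT A =====
-- A's inner while loop; `int(math.log2(distance + 1))` is ported as `Nat.log2`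
-- (exact on the |n| ≤ 2^31 domain, where the float log2 of an integer is exact enough).
def pvMinJumpsA (distance : Int) (jumps : Int) : Int :=
  if _h0 : 0 ≤ distance then
    if h1 : distance = 0 then jumps + 1
    else
      let d := Nat.log2 (distance + 1).toNat
      if d = 0 then jumps + 1
      else
        let y : Int := 2 ^ d - 1
        let distance' := distance - (y + 1)
        if distance' = -1 then jumps + 1
        else pvMinJumpsA distance' (jumps + 1)
  else jumps
termination_by distance.toNat
decreasing_by
  have h2 : (1:Int) ≤ 2 ^ (Nat.log2 (distance + 1).toNat) := one_le_pow₀ (by norm_num)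
  simp only [Int.lt_toNat]
  omega

def calculate_min_jumps_difference (X : Int) (Y : Int) : Int × Int :=
  let jumps_player1 := pvMinJumpsA X 0
  let jumps_player2 := pvMinJumpsA Y 0
  if jumps_player1 = jumps_player2 then (0, 0)
  else if jumps_player1 < jumps_player2 then (1, jumps_player2 - jumps_player1)
  else (2, jumps_player1 - jumps_player2)

-- ===== PORT B =====
-- `bin(n).count('1')` for n ≥ 0: number of 1s in the binary digits.
def pvPopcount (n : Nat) : Nat :=
  if n = 0 then 0 else n % 2 + pvPopcount (n / 2)

def pvMinJumpsB (distance : Int) : Int :=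
  if distance < 0 then 0 else (pvPopcount (distance + 1).toNat : Int)

def calculate_min_jumps_difference_alt (X : Int) (Y : Int) : Int × Int :=
  let jumps_player1 := pvMinJumpsB X
  let jumps_player2 := pvMinJumpsB Y
  if jumps_player1 = jumps_player2 then (0, 0)
  else if jumps_player1 < jumps_player2 then (1, jumps_player2 - jumps_player1)
  else (2, jumps_player1 - jumps_player2)

-- ===== PRECONDITION & SPEC =====
def Spec_calculate_min_jumps_difference (X : Int) (Y : Int) (out : Int × Int) : Prop := out = calculate_min_jumps_difference_alt X Y
instance (X : Int) (Y : Int) (out : Int × Int) : Decidable (Spec_calculate_min_jumps_difference X Y out) := by unfold Spec_calculate_min_jumps_difference; infer_instance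

-- ===== CLAIM (what is proved, stated in full; the proofs are below) =====
def Claim_equal_calculate_min_jumps_difference : Prop := ∀ (X : Int) (Y : Int), Dom_calculate_min_jumps_difference X Y → Spec_calculate_min_jumps_difference X Y (calculate_min_jumps_difference X Y)

-- ===== LEMMAS AND PROOFS =====

-- stripping the top bit removes one 1 from the popcount
theorem pvPopcount_strip (d : Nat) : ∀ n, 2 ^ d ≤ n → n < 2 ^ (d + 1) →
    pvPopcount n = 1 + pvPopcount (n - 2 ^ d) := by
  induction d with
  | zero =>
    intro n h1 h2
    have : n = 1 := by omega
    subst this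
    simp [pvPopcount]
  | succ d ih =>
    intro n h1 h2
    have hp : 0 < 2 ^ (d + 1) := Nat.pow_pos (by norm_num)
    have hn0 : n ≠ 0 := by omega
    have hhalf1 : 2 ^ d ≤ n / 2 := by
      have := Nat.div_le_div_right (c := 2) h1
      simpa [Nat.pow_succ, Nat.mul_div_cancel] using this
    have hhalf2 : n / 2 < 2 ^ (d + 1) := by
      rw [Nat.div_lt_iff_lt_mul (by norm_num)]
      calc n < 2 ^ (d + 1 + 1) := h2
        _ = 2 ^ (d + 1) * 2 := by ring
    have hq : n / 2 - 2 ^ d = (n - 2 ^ (d + 1)) / 2 := by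
      omega
    have hm : n % 2 = (n - 2 ^ (d + 1)) % 2 := by
      omega
    have hsub0 : n - 2 ^ (d + 1) = 0 ∨ n - 2 ^ (d + 1) ≠ 0 := by omega
    rw [pvPopcount, if_neg hn0, ih (n / 2) hhalf1 hhalf2, hq, hm]
    rcases hsub0 with h | h
    · rw [h]; simp [pvPopcount]
    · conv_rhs => rw [pvPopcount, if_neg h]
      omega

theorem pvMinJumpsA_eq (k : Nat) : ∀ (distance jumps : Int), distance.toNat ≤ k → 0 ≤ distance →
    pvMinJumpsA distance jumps = jumps + pvPopcount (distance + 1).toNat := by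
  induction k with
  | zero =>
    intro distance jumps hk h0
    have : distance = 0 := by omega
    subst this
    rw [pvMinJumpsA]
    norm_num
    simp [pvPopcount]
  | succ k ih =>
    intro distance jumps hk h0
    rw [pvMinJumpsA, dif_pos h0]
    by_cases h1 : distance = 0
    · subst h1; simp [pvPopcount]
    · rw [dif_neg h1]
      have hd1 : (1:Int) ≤ distance := by omega
      set n : Nat := (distance + 1).toNat with hn
      have hn2 : 2 ≤ n := by omega
      have hnd : (n : Int) = distance + 1 := by omega
      set d : Nat := Nat.log2 n with hdlog
      have hd0 : d ≠ 0 := by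
        intro h
        have h2le : 2 ^ 1 ≤ n := by omega
        have := (Nat.le_log2 (n := n) (k := 1) (by omega)).mpr h2le
        omega
      rw [if_neg hd0]
      have hlow : 2 ^ d ≤ n := Nat.log2_self_le (by omega)
      have hhigh : n < 2 ^ (d + 1) := Nat.lt_log2_self
      have hpowc : ((2 ^ d : Nat) : Int) = 2 ^ d := by push_cast; ring
      have hlow' : ((2:Int) ^ d) ≤ n := by rw [← hpowc]; exact_mod_cast hlow
      have hhigh' : (n:Int) < 2 ^ (d + 1) := by
        have : ((2 ^ (d+1) : Nat) : Int) = 2 ^ (d+1) := by push_cast; ring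
        rw [← this]; exact_mod_cast hhigh
      have hpop := pvPopcount_strip d n hlow hhigh
      have hsub : (distance - (2 ^ d - 1 + 1) + 1).toNat = n - 2 ^ d := by
        omega
      by_cases hm1 : distance - (2 ^ d - 1 + 1) = -1
      · rw [if_pos hm1]
        have : n - 2 ^ d = 0 := by omega
        rw [hpop, this]
        simp [pvPopcount]
      · rw [if_neg hm1]
        have hge : 0 ≤ distance - (2 ^ d - 1 + 1) := by
          have : (0:Int) ≤ (n:Int) - 2 ^ d := by omega
          omega
        have hpow2 : (2:Int) ≤ 2 ^ d := by
          calc (2:Int) = 2 ^ 1 := by norm_num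
            _ ≤ 2 ^ d := by
              apply pow_le_pow_right₀ (by norm_num)
              omega
        have hlt : (distance - (2 ^ d - 1 + 1)).toNat ≤ k := by omega
        rw [ih _ (jumps + 1) hlt hge, hsub, hpop]
        push_cast
        ring

theorem pvMinJumps_agree (distance : Int) : pvMinJumpsA distance 0 = pvMinJumpsB distance := by
  by_cases h : 0 ≤ distance
  · rw [pvMinJumpsA_eq distance.toNat distance 0 le_rfl h, pvMinJumpsB, if_neg (by omega)]
    ring
  · rw [pvMinJumpsA, dif_neg h, pvMinJumpsB, if_pos (by omega)]

-- ===== VERDICT (by name: the statement is the Claim_ definition above) =====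
theorem calculate_min_jumps_difference_spec : Claim_equal_calculate_min_jumps_difference := by
  intro X Y _
  unfold Spec_calculate_min_jumps_difference calculate_min_jumps_difference calculate_min_jumps_difference_alt
  rw [pvMinJumps_agree, pvMinJumps_agree]
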